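-- pv_equiv track=rewrite | github.com/zewy9910-ux/Z22SE_Tuner | ecu_analysis.py | diff_regions
-- ===== SOURCE A (Python) =====
-- def diff_regions(a, b):
--     diffs, start, prev = [], None, None
--     for i in range(len(a)):
--         if a[i] != b[i]:
--             if start is None: start = i
--             prev = i
--         else:
--             if start is not None:
--                 diffs.append((start, prev))
--                 start = None
--     if start is not None:
--         diffs.append((start, prev))
--     # merge if gap <= 8
--     merged = []
--     for s, e in diffs:
--         if merged and s - merged[-1][1] <= 8:
--             merged[-1] = (merged[-1][0], e)
--         else:
--             merged.append([s, e])
--     return [(s, e) for s, e in merged]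
-- ===== SOURCE B (Python) =====
-- def diff_regions(a, b):
--     # Single scan: keep one open (start, prev) region and merge on the fly,
--     # instead of building the run list and then a second merge pass.
--     res = []
--     start = prev = None
--     for i in range(len(a)):
--         if a[i] != b[i]:
--             if start is None:
--                 start = prev = i
--             elif i - prev <= 8:
--                 prev = i
--             else:
--                 res.append((start, prev))
--                 start = prev = i
--     if start is not None:
--         res.append((start, prev))
--     return res
-- ===== Notes on version B (the rewrite author's own statement) =====
-- stated objective: simpler
-- what changed: Replaces A's two passes (collect maximal diff runs, then merge runs with gap <= 8) by one scan that keeps a single open (start, prev) region, extending it while the next diff index is within 8 of the previous one and flushing it otherwise; no intermediate diffs/merged lists are built.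
import Mathlib
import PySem

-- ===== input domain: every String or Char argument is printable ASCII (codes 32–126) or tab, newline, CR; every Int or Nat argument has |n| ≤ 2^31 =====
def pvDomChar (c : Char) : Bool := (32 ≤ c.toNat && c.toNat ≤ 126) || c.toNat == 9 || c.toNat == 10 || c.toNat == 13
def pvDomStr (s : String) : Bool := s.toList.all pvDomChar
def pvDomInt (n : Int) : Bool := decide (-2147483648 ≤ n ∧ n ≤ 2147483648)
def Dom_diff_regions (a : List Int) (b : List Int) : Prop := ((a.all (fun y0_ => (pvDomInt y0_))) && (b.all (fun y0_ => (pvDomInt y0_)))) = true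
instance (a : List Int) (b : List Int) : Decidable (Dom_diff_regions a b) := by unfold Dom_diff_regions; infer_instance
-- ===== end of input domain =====

-- B replaces A's build-runs-then-merge two-pass structure by one scan that merges on the fly; same O(n) cost.
-- Both Pythons raise IndexError when len(b) < len(a); Pre_ excludes exactly those inputs.

-- ===== PORT A =====
-- First pass: collect maximal runs of differing indices; state (diffs, start, prev).
-- `some (st.2.1.getD i)` transliterates "if start is None: start = i" (keep start if set).
-- `st.2.2.getD 0` reads prev where Python reads `prev`; prev is always set when start is set.
def stepA (a : List Int) (b : List Int)
    (st : List (Int × Int) × Option Int × Option Int) (i : Int) :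
    List (Int × Int) × Option Int × Option Int :=
  if PySem.List.pyGetD a i 0 ≠ PySem.List.pyGetD b i 0 then
    (st.1, some (st.2.1.getD i), some i)
  else
    match st.2.1 with
    | some s => (st.1 ++ [(s, st.2.2.getD 0)], none, st.2.2)
    | none => st

-- Second pass: "if merged and s - merged[-1][1] <= 8: merged[-1] = (merged[-1][0], e) else append".
def mergeStep (acc : List (Int × Int)) (se : Int × Int) : List (Int × Int) :=
  match acc.getLast? with
  | some (ms, me) => if se.1 - me ≤ 8 then acc.dropLast ++ [(ms, se.2)] else acc ++ [se]
  | none => acc ++ [se]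

-- The final list comprehension `[(s, e) for s, e in merged]` is the identity on pairs.
def diff_regions (a : List Int) (b : List Int) : List (Int × Int) :=
  let st := (PySem.List.pyRange 0 a.length 1).foldl (stepA a b) ([], none, none)
  let diffs :=
    match st.2.1 with
    | some s => st.1 ++ [(s, st.2.2.getD 0)]
    | none => st.1
  diffs.foldl mergeStep []

-- ===== PORT B =====
-- Single scan; state (res, open) where open is the current (start, prev) region or none.
def stepB (a : List Int) (b : List Int)
    (st : List (Int × Int) × Option (Int × Int)) (i : Int) :
    List (Int × Int) × Option (Int × Int) :=
  if PySem.List.pyGetD a i 0 ≠ PySem.List.pyGetD b i 0 then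
    match st.2 with
    | none => (st.1, some (i, i))
    | some (s0, p0) =>
        if i - p0 ≤ 8 then (st.1, some (s0, i))
        else (st.1 ++ [(s0, p0)], some (i, i))
  else st

def diff_regions_alt (a : List Int) (b : List Int) : List (Int × Int) :=
  let st := (PySem.List.pyRange 0 a.length 1).foldl (stepB a b) ([], none)
  match st.2 with
  | some (s0, p0) => st.1 ++ [(s0, p0)]
  | none => st.1

-- ===== PRECONDITION & SPEC =====
-- Python A indexes b[i] for every i < len(a): it raises IndexError iff len(b) < len(a).
def Pre_diff_regions (a : List Int) (b : List Int) : Prop := a.length ≤ b.length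
instance (a : List Int) (b : List Int) : Decidable (Pre_diff_regions a b) := by
  unfold Pre_diff_regions; infer_instance

def pvWitness_diff_regions : List Int × List Int := ([0, 1, 2, 3], [0, 9, 2, 7])

def Spec_diff_regions (a : List Int) (b : List Int) (out : List (Int × Int)) : Prop := out = diff_regions_alt a b
instance (a : List Int) (b : List Int) (out : List (Int × Int)) : Decidable (Spec_diff_regions a b out) := by unfold Spec_diff_regions; infer_instance

-- ===== CLAIM (what is proved, stated in full; the proofs are below) =====
def Claim_equal_diff_regions : Prop := ∀ (a : List Int) (b : List Int), Dom_diff_regions a b → Pre_diff_regions a b → Spec_diff_regions a b (diff_regions a b)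

-- ===== LEMMAS AND PROOFS =====

-- The invariant tying A's state (d, s, p) before index i to B's state (acc, o).
def RunInv (i : Int) (d : List (Int × Int)) (s p : Option Int)
    (acc : List (Int × Int)) (o : Option (Int × Int)) : Prop :=
  match s, o with
  | none, none => d = [] ∧ acc = []
  | none, some (s0, p0) => d.foldl mergeStep [] = acc ++ [(s0, p0)]
  | some si, some (s0, p0) =>
      p = some p0 ∧ i = p0 + 1 ∧
      ∀ e : Int, (d ++ [(si, e)]).foldl mergeStep [] = acc ++ [(s0, e)]
  | some _, none => False

def finalA (st : List (Int × Int) × Option Int × Option Int) : List (Int × Int) :=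
  (match st.2.1 with
   | some s => st.1 ++ [(s, st.2.2.getD 0)]
   | none => st.1).foldl mergeStep []

def finalB (st : List (Int × Int) × Option (Int × Int)) : List (Int × Int) :=
  match st.2 with
  | some (s0, p0) => st.1 ++ [(s0, p0)]
  | none => st.1

theorem mergeFold_concat (d : List (Int × Int)) (x : Int × Int) :
    (d ++ [x]).foldl mergeStep [] = mergeStep (d.foldl mergeStep []) x := by
  simp [List.foldl_append]

theorem mergeStep_concat_le (acc : List (Int × Int)) (s0 p0 : Int) (x : Int × Int)
    (h : x.1 - p0 ≤ 8) :
    mergeStep (acc ++ [(s0, p0)]) x = acc ++ [(s0, x.2)] := by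
  simp [mergeStep, h]

theorem mergeStep_concat_gt (acc : List (Int × Int)) (s0 p0 : Int) (x : Int × Int)
    (h : ¬ x.1 - p0 ≤ 8) :
    mergeStep (acc ++ [(s0, p0)]) x = acc ++ [(s0, p0)] ++ [x] := by
  simp [mergeStep, h]

theorem main_lemma (a b : List Int) (n : Int) (k : Nat) :
    ∀ (i : Int), i + k = n →
    ∀ (d : List (Int × Int)) (s p : Option Int) (acc : List (Int × Int))
      (o : Option (Int × Int)), RunInv i d s p acc o →
    finalA ((PySem.List.pyRange i n 1).foldl (stepA a b) (d, s, p)) =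
      finalB ((PySem.List.pyRange i n 1).foldl (stepB a b) (acc, o)) := by
  induction k with
  | zero =>
      intro i hi d s p acc o hinv
      rw [PySem.List.pyRange_one_eq_nil (by omega)]
      simp only [List.foldl_nil]
      rcases s with _ | si <;> rcases o with _ | ⟨s0, p0⟩
      · obtain ⟨hd, ha⟩ := hinv; simp [finalA, finalB, hd, ha]
      · simpa [finalA, finalB] using hinv
      · exact hinv.elim
      · obtain ⟨hp, _, he⟩ := hinv
        simp only [finalA, finalB, hp]
        exact he p0
  | succ k ih =>
      intro i hi d s p acc o hinv
      rw [PySem.List.pyRange_one_cons (by omega)]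
      simp only [List.foldl_cons]
      by_cases hne : PySem.List.pyGetD a i 0 ≠ PySem.List.pyGetD b i 0
      · -- differing index i
        have hA : stepA a b (d, s, p) i = (d, some (s.getD i), some i) := by
          simp [stepA, hne]
        rcases s with _ | si <;> rcases o with _ | ⟨s0, p0⟩
        · -- no run open on either side
          obtain ⟨hd, ha⟩ := hinv
          have hB : stepB a b (acc, none) i = (acc, some (i, i)) := by
            simp [stepB, hne]
          rw [hA, hB]
          apply ih (i + 1) (by omega)
          refine ⟨rfl, rfl, ?_⟩
          intro e
          simp [hd, ha, mergeStep]
        · -- A between runs, B holding a closed-but-mergeable region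
          by_cases hgap : i - p0 ≤ 8
          · have hB : stepB a b (acc, some (s0, p0)) i = (acc, some (s0, i)) := by
              simp [stepB, hne, if_pos (by omega : i ≤ 8 + p0)]
            rw [hA, hB]
            apply ih (i + 1) (by omega)
            refine ⟨rfl, rfl, ?_⟩
            intro e
            simp only [Option.getD_none]
            rw [mergeFold_concat, hinv, mergeStep_concat_le acc s0 p0 (i, e) hgap]
          · have hB : stepB a b (acc, some (s0, p0)) i
                = (acc ++ [(s0, p0)], some (i, i)) := by
              simp [stepB, hne, if_neg (by omega : ¬ i ≤ 8 + p0)]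
            rw [hA, hB]
            apply ih (i + 1) (by omega)
            refine ⟨rfl, rfl, ?_⟩
            intro e
            simp only [Option.getD_none]
            rw [mergeFold_concat, hinv, mergeStep_concat_gt acc s0 p0 (i, e) hgap]
        · exact hinv.elim
        · -- both in an open run: prev = i - 1, so the gap is 1 and B extends
          obtain ⟨hp, hi1, he⟩ := hinv
          have hB : stepB a b (acc, some (s0, p0)) i = (acc, some (s0, i)) := by
            simp [stepB, hne, if_pos (by omega : i ≤ 8 + p0)]
          rw [hA, hB]
          apply ih (i + 1) (by omega)
          exact ⟨rfl, rfl, he⟩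
      · -- equal index i
        have hB : stepB a b (acc, o) i = (acc, o) := by simp [stepB, hne]
        rw [hB]
        rcases s with _ | si
        · have hA : stepA a b (d, none, p) i = (d, none, p) := by
            simp [stepA, hne]
          rw [hA]
          rcases o with _ | ⟨s0, p0⟩
          · exact ih (i + 1) (by omega) d none p acc none hinv
          · exact ih (i + 1) (by omega) d none p acc (some (s0, p0)) hinv
        · rcases o with _ | ⟨s0, p0⟩
          · exact hinv.elim
          · obtain ⟨hp, hi1, he⟩ := hinv
            have hA : stepA a b (d, some si, p) i
                = (d ++ [(si, p.getD 0)], none, p) := by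
              simp [stepA, hne]
            rw [hA]
            apply ih (i + 1) (by omega)
            show (d ++ [(si, p.getD 0)]).foldl mergeStep [] = acc ++ [(s0, p0)]
            rw [hp]
            exact he p0

-- ===== VERDICT (by name: the statement is the Claim_ definition above) =====
theorem diff_regions_spec : Claim_equal_diff_regions := by
  intro a b _ _
  show diff_regions a b = diff_regions_alt a b
  have h := main_lemma a b (a.length : Int) a.length 0 (by omega)
      [] none none [] none (by exact ⟨rfl, rfl⟩)
  simpa [diff_regions, diff_regions_alt, finalA, finalB] using h
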